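-- pv_equiv track=rewrite | github.com/ParamonovED/Epam_HW | homework_07/hw2.py | backspace_tapping
-- ===== SOURCE A (Python) =====
-- def backspace_tapping(word):
--     counter = 0
--     answer = ""
--     for symbol in word:
--         if symbol == "#":
--             counter += 1
--         if symbol != "#" and counter == 0:
--             answer += symbol
--         if symbol != "#" and counter != 0:
--             counter -= 1
--     return answer
-- ===== SOURCE B (Python) =====
-- def backspace_tapping(word):
--     stack = []
--     for symbol in reversed(word):
--         if symbol == "#":
--             if stack:
--                 stack.pop()
--         else:
--             stack.append(symbol)
--     return "".join(stack)[::-1]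
-- ===== Notes on version B (the rewrite author's own statement) =====
-- stated objective: idiomatic
-- what changed: Replaces the forward skip-counter over the string with a right-to-left pass maintaining a stack of surviving characters ('#' pops, other chars push), joined and reversed at the end.
import Mathlib
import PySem

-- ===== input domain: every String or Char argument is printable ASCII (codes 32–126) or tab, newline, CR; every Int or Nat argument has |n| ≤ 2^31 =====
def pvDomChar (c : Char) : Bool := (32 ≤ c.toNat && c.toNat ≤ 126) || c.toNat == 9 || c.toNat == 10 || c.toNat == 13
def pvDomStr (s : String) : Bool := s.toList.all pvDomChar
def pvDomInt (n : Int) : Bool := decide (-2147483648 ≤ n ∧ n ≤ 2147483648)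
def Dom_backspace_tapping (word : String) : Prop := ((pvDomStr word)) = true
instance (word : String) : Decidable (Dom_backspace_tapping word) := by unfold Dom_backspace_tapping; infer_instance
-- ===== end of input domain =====

-- B replaces A's forward skip-counter with a reversed-pass stack of surviving characters (idiomatic backspace-string solution); same return value, no side effects.

-- ===== PORT A =====
-- A's loop: state (counter : Int, answer carried as List Char); the three ifs in order.
def backspace_tapping (word : String) : String :=
  let st := word.toList.foldl (fun (s : Int × List Char) symbol =>
    let counter := if symbol = '#' then s.1 + 1 else s.1
    let answer := if symbol ≠ '#' ∧ counter = 0 then s.2 ++ [symbol] else s.2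
    let counter := if symbol ≠ '#' ∧ counter ≠ 0 then counter - 1 else counter
    (counter, answer)) (0, [])
  String.ofList st.2

-- ===== PORT B =====
-- stack is kept head-first (push = cons; pop = drop the head, a no-op on the empty stack),
-- so ''.join(stack) is String.ofList stack.reverse and the final [::-1] reverses its chars.
def backspace_tapping_alt (word : String) : String :=
  let stack := word.toList.reverse.foldl (fun (stack : List Char) symbol =>
    if symbol = '#' then
      match stack with
      | [] => []
      | _ :: t => t
    else symbol :: stack) []
  String.ofList (String.ofList stack.reverse).toList.reverse

-- ===== PRECONDITION & SPEC =====
def Spec_backspace_tapping (word : String) (out : String) : Prop := out = backspace_tapping_alt word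
instance (word : String) (out : String) : Decidable (Spec_backspace_tapping word out) := by unfold Spec_backspace_tapping; infer_instance

-- ===== CLAIM (what is proved, stated in full; the proofs are below) =====
def Claim_equal_backspace_tapping : Prop := ∀ (word : String), Dom_backspace_tapping word → Spec_backspace_tapping word (backspace_tapping word)

-- ===== LEMMAS AND PROOFS =====

-- the stack B builds for a suffix, written as a foldr (front = top of stack)
def pvStack (l : List Char) : List Char :=
  l.foldr (fun symbol stack =>
    if symbol = '#' then
      match stack with
      | [] => []
      | _ :: t => t
    else symbol :: stack) []

theorem pvStack_hash (t : List Char) : pvStack ('#' :: t) = (pvStack t).tail := by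
  unfold pvStack
  simp only [List.foldr_cons, reduceIte]
  cases t.foldr (fun symbol stack =>
    if symbol = '#' then
      match stack with
      | [] => []
      | _ :: t => t
    else symbol :: stack) [] <;> rfl

theorem pvStack_cons {x : Char} (t : List Char) (hx : ¬ x = '#') :
    pvStack (x :: t) = x :: pvStack t := by
  unfold pvStack; simp [hx]

-- B's foldl over the reversed list is pvStack
theorem pvStack_eq_foldl (l : List Char) :
    l.reverse.foldl (fun (stack : List Char) symbol =>
      if symbol = '#' then
        match stack with
        | [] => []
        | _ :: t => t
      else symbol :: stack) [] = pvStack l := by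
  simp [pvStack, List.foldl_reverse]

-- A's loop invariant: from state (c, ans) with 0 ≤ c, the answer component ends as ans ++ (pvStack l).drop c.toNat
theorem pvA_inv (l : List Char) : ∀ (c : Int) (ans : List Char), 0 ≤ c →
    (l.foldl (fun (s : Int × List Char) symbol =>
      let counter := if symbol = '#' then s.1 + 1 else s.1
      let answer := if symbol ≠ '#' ∧ counter = 0 then s.2 ++ [symbol] else s.2
      let counter := if symbol ≠ '#' ∧ counter ≠ 0 then counter - 1 else counter
      (counter, answer)) (c, ans)).2 = ans ++ (pvStack l).drop c.toNat := by
  induction l with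
  | nil => intro c ans hc; simp [pvStack]
  | cons x t ih =>
    intro c ans hc
    by_cases hx : x = '#'
    · subst hx
      simp only [List.foldl_cons, reduceIte, ne_eq, not_true_eq_false, false_and, if_false]
      rw [ih (c+1) ans (by omega), pvStack_hash, List.drop_tail,
        show c.toNat + 1 = (c+1).toNat by omega]
    · by_cases hc0 : c = 0
      · subst hc0
        simp only [List.foldl_cons, hx, if_false, ne_eq, not_false_eq_true, true_and,
          not_true_eq_false, and_false, if_true]
        rw [ih 0 (ans ++ [x]) le_rfl, pvStack_cons t hx]
        simp
      · simp only [List.foldl_cons, hx, if_false, ne_eq, not_false_eq_true, true_and,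
          hc0, if_true]
        rw [ih (c-1) ans (by omega), pvStack_cons t hx,
          show c.toNat = (c-1).toNat + 1 by omega, List.drop_succ_cons]

-- ===== VERDICT (by name: the statement is the Claim_ definition above) =====
theorem backspace_tapping_spec : Claim_equal_backspace_tapping := by
  intro word _
  unfold Spec_backspace_tapping backspace_tapping backspace_tapping_alt
  dsimp only
  rw [pvStack_eq_foldl, pvA_inv word.toList 0 [] le_rfl]
  simp
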